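-- pv_equiv track=rewrite | github.com/axel-slid/unified_eval_framework | benchmark/reports/generate_plot.py | pick_examples
-- ===== SOURCE A (Python) =====
-- CATEGORIES = ["blinds", "chairs", "table", "whiteboard"]
--
-- def pick_examples(data: dict, lookup: dict) -> dict[str, dict[str, str]]:
--     """
--     For each category, pick one clean and one messy image filename.
--     Prefer images where at least one model got it right and one wrong.
--     """
--     examples: dict[str, dict[str, str]] = {}
--     by_cat: dict[str, list[str]] = {}
--     for fn, models in lookup.items():
--         any_r = next(iter(models.values()))
--         ct = any_r.get("change_type", "")
--         label = any_r.get("label", "")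
--         by_cat.setdefault(ct, {}).setdefault(label, [])
--         by_cat[ct][label].append(fn)
--
--     for ct in CATEGORIES:
--         examples[ct] = {}
--         for label in ("clean", "messy"):
--             candidates = by_cat.get(ct, {}).get(label, [])
--             if not candidates:
--                 continue
--             # Prefer one with mixed correct/wrong across models
--             best = candidates[0]
--             for fn in candidates:
--                 preds = [lookup[fn][k].get("predicted_class") for k in data["models"] if k in lookup[fn]]
--                 gts = [lookup[fn][k].get("gt_class") for k in data["models"] if k in lookup[fn]]
--                 n_correct = sum(p == g for p, g in zip(preds, gts) if p)
--                 if 0 < n_correct < len(preds):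
--                     best = fn
--                     break
--             examples[ct][label] = best
--     return examples
-- ===== SOURCE B (Python) =====
-- CATEGORIES = ["blinds", "chairs", "table", "whiteboard"]
--
--
-- def pick_examples(data: dict, lookup: dict) -> dict[str, dict[str, str]]:
--     """
--     Single pass over lookup: for each (category, label) key remember the first
--     filename seen and the first 'mixed' filename seen (some model right, some
--     wrong). No candidate lists are built and no per-cell rescanning happens.
--     """
--     model_names = data.get("models", [])
--     first: dict[tuple[str, str], str] = {}
--     first_mixed: dict[tuple[str, str], str] = {}
--     for fn, models in lookup.items():
--         rec = next(iter(models.values()))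
--         key = (rec.get("change_type", ""), rec.get("label", ""))
--         if key not in first:
--             first[key] = fn
--         if key not in first_mixed:
--             rows = [models[k] for k in model_names if k in models]
--             n_ok = sum(1 for r in rows
--                        if r.get("predicted_class")
--                        and r.get("predicted_class") == r.get("gt_class"))
--             if 0 < n_ok < len(rows):
--                 first_mixed[key] = fn
--     return {ct: {label: first_mixed.get((ct, label), first[(ct, label)])
--                  for label in ("clean", "messy") if (ct, label) in first}
--             for ct in CATEGORIES}
-- ===== Notes on version B (the rewrite author's own statement) =====
-- stated objective: alternative
-- what changed: Replaces A's two-phase group-then-rescan (build by_cat lists, then for each cell scan candidates recomputing the mixed test until one hits) with a single streaming pass that keeps, per (category,label) key, only the first filename and the first mixed filename, evaluating the mixed test once per file and building no candidate lists; output is then a pure lookup.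
import Mathlib
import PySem

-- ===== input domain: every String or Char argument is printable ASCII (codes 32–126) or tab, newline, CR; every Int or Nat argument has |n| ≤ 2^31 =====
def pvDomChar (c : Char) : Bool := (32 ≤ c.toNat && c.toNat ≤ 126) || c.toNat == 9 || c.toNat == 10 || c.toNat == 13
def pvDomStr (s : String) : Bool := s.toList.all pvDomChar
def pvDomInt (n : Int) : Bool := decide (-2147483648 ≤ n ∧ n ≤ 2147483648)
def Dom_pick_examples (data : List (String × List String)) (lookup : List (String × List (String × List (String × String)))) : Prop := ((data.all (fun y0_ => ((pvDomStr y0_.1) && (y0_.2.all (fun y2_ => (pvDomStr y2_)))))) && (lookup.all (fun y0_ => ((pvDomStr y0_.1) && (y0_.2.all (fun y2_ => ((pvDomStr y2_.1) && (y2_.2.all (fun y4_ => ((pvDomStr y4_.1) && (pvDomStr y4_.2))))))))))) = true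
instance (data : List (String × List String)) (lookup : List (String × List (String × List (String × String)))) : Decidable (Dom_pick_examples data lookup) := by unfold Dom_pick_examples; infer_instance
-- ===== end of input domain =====

-- B replaces A's group-then-rescan with a single streaming pass keeping only the first and the
-- first-mixed filename per (category,label); return values agree wherever the Python A returns.

def CATEGORIES : List String := ["blinds", "chairs", "table", "whiteboard"]

-- Python's truthiness test `if p` for p an Optional[str]
def truthy : Option String → Bool
  | none => false
  | some s => !(s == "")

-- ===== PORT A =====

-- next(iter(models.values())); Python raises StopIteration on an empty dict (excluded by Pre_),
-- the total form returns [] there.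
def aAnyR (models : List (String × List (String × String))) : List (String × String) :=
  (models.map Prod.snd).headD []

-- lookup[fn]; A only evaluates it for fn a key of lookup, so the total form with default [] is exact.
def aRow (lookup : List (String × List (String × List (String × String)))) (fn : String) :
    List (String × List (String × String)) :=
  (PySem.Dict.mk lookup).getD fn []

-- preds = [lookup[fn][k].get("predicted_class") for k in data["models"] if k in lookup[fn]]
-- data["models"]; Python raises KeyError when the key is absent (excluded by Pre_), total form gives [].
def aPreds (data : List (String × List String)) (lookup : List (String × List (String × List (String × String)))) (fn : String) : List (Option String) :=
  (((PySem.Dict.mk data).getD "models" []).filter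
      (fun k => (PySem.Dict.mk (aRow lookup fn)).contains k)).map
    (fun k => (PySem.Dict.mk ((PySem.Dict.mk (aRow lookup fn)).getD k [])).get? "predicted_class")

def aGts (data : List (String × List String)) (lookup : List (String × List (String × List (String × String)))) (fn : String) : List (Option String) :=
  (((PySem.Dict.mk data).getD "models" []).filter
      (fun k => (PySem.Dict.mk (aRow lookup fn)).contains k)).map
    (fun k => (PySem.Dict.mk ((PySem.Dict.mk (aRow lookup fn)).getD k [])).get? "gt_class")

-- n_correct = sum(p == g for p, g in zip(preds, gts) if p)
def aNCorrect (data : List (String × List String)) (lookup : List (String × List (String × List (String × String)))) (fn : String) : Nat :=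
  ((aPreds data lookup fn).zip (aGts data lookup fn)).countP
    (fun pg => truthy pg.1 && pg.1 == pg.2)

-- for fn in candidates: … if 0 < n_correct < len(preds): best = fn; break
def aPickLoop (data : List (String × List String)) (lookup : List (String × List (String × List (String × String)))) : List String → String → String
  | [], best => best
  | fn :: rest, best =>
      if 0 < aNCorrect data lookup fn ∧ aNCorrect data lookup fn < (aPreds data lookup fn).length
      then fn else aPickLoop data lookup rest best

-- by_cat.setdefault(ct, {}).setdefault(label, []); by_cat[ct][label].append(fn)  — as nested modify
def aStep (d : PySem.Dict String (PySem.Dict String (List String)))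
    (p : String × List (String × List (String × String))) :
    PySem.Dict String (PySem.Dict String (List String)) :=
  let any_r := aAnyR p.2
  let ct := (PySem.Dict.mk any_r).getD "change_type" ""
  let label := (PySem.Dict.mk any_r).getD "label" ""
  d.modify ct PySem.Dict.empty (fun inner => inner.modify label [] (fun xs => xs ++ [p.1]))

def aByCat (lookup : List (String × List (String × List (String × String)))) :
    PySem.Dict String (PySem.Dict String (List String)) :=
  lookup.foldl aStep PySem.Dict.empty

def pick_examples (data : List (String × List String)) (lookup : List (String × List (String × List (String × String)))) : List (String × List (String × String)) :=
  let by_cat := aByCat lookup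
  -- for ct in CATEGORIES: examples[ct] = {}; for label in ("clean","messy"): …  (CATEGORIES keys are distinct,
  -- so the examples dict is exactly this association list in insertion order)
  CATEGORIES.map (fun ct =>
    (ct, (["clean", "messy"] : List String).foldl (fun ex label =>
      match (by_cat.getD ct PySem.Dict.empty).getD label [] with
      | [] => ex                                   -- if not candidates: continue
      | c :: rest => ex ++ [(label, aPickLoop data lookup (c :: rest) c)]) []))

-- ===== PORT B =====

-- key = (rec.get("change_type", ""), rec.get("label", ""))  with rec = next(iter(models.values()))
def bKey (models : List (String × List (String × String))) : String × String :=
  let rec_ := (models.map Prod.snd).headD []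
  ((PySem.Dict.mk rec_).getD "change_type" "", (PySem.Dict.mk rec_).getD "label" "")

-- rows = [models[k] for k in model_names if k in models]; 0 < n_ok < len(rows)
def bMixed (model_names : List String) (models : List (String × List (String × String))) : Bool :=
  let rows := (model_names.filter (fun k => (PySem.Dict.mk models).contains k)).map
    (fun k => (PySem.Dict.mk models).getD k [])
  let n_ok := rows.countP (fun r =>
    truthy ((PySem.Dict.mk r).get? "predicted_class") &&
    ((PySem.Dict.mk r).get? "predicted_class" == (PySem.Dict.mk r).get? "gt_class"))
  decide (0 < n_ok ∧ n_ok < rows.length)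

-- one loop iteration: update first / first_mixed
def bStep (model_names : List String)
    (st : PySem.Dict (String × String) String × PySem.Dict (String × String) String)
    (p : String × List (String × List (String × String))) :
    PySem.Dict (String × String) String × PySem.Dict (String × String) String :=
  let key := bKey p.2
  let first := if st.1.contains key then st.1 else st.1.insert key p.1
  let fm := if st.2.contains key then st.2
            else if bMixed model_names p.2 then st.2.insert key p.1 else st.2
  (first, fm)

def pick_examples_alt (data : List (String × List String)) (lookup : List (String × List (String × List (String × String)))) : List (String × List (String × String)) :=
  let model_names := (PySem.Dict.mk data).getD "models" []
  let st := lookup.foldl (bStep model_names) (PySem.Dict.empty, PySem.Dict.empty)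
  -- {ct: {label: first_mixed.get(key, first[key]) for label in … if key in first} for ct in CATEGORIES}
  CATEGORIES.map (fun ct =>
    (ct, (["clean", "messy"] : List String).foldl (fun ex label =>
      match st.1.get? (ct, label) with
      | none => ex
      | some f => ex ++ [(label, (st.2.get? (ct, label)).getD f)]) []))

-- ===== PRECONDITION & SPEC =====

-- Pre_ excludes exactly: (a) inputs where Python A raises — an empty models dict for some file
-- (StopIteration in next(iter(models.values()))), or a missing "models" key in data when some
-- candidate cell is nonempty (KeyError at data["models"]) — and (b) association lists whose keys
-- repeat, which do not represent any Python dict (a Python dict has unique keys), so nothing A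
-- returns on is excluded by (b).
def Pre_pick_examples (data : List (String × List String)) (lookup : List (String × List (String × List (String × String)))) : Prop :=
  (lookup.map Prod.fst).Nodup ∧
  (∀ p ∈ lookup, p.2 ≠ []) ∧
  ((∃ p ∈ lookup, (bKey p.2).1 ∈ CATEGORIES ∧ (bKey p.2).2 ∈ (["clean", "messy"] : List String)) →
    "models" ∈ data.map Prod.fst)

instance (data : List (String × List String)) (lookup : List (String × List (String × List (String × String)))) : Decidable (Pre_pick_examples data lookup) := by unfold Pre_pick_examples; infer_instance

def pvWitness_pick_examples : (List (String × List String)) × (List (String × List (String × List (String × String)))) :=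
  ([("models", ["m1"])],
   [("img1.png", [("m1", [("change_type", "chairs"), ("label", "clean"),
                          ("predicted_class", "a"), ("gt_class", "a")])])])

def Spec_pick_examples (data : List (String × List String)) (lookup : List (String × List (String × List (String × String)))) (out : List (String × List (String × String))) : Prop := out = pick_examples_alt data lookup
instance (data : List (String × List String)) (lookup : List (String × List (String × List (String × String)))) (out : List (String × List (String × String))) : Decidable (Spec_pick_examples data lookup out) := by unfold Spec_pick_examples; infer_instance

-- ===== CLAIM (what is proved, stated in full; the proofs are below) =====
def Claim_equal_pick_examples : Prop := ∀ (data : List (String × List String)) (lookup : List (String × List (String × List (String × String)))), Dom_pick_examples data lookup → Pre_pick_examples data lookup → Spec_pick_examples data lookup (pick_examples data lookup)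

-- ===== LEMMAS AND PROOFS =====

-- Ghost grouping fold used only in the proof: the flat (ct,label) → candidate-list dict.
def gStep (d : PySem.Dict (String × String) (List String))
    (p : String × List (String × List (String × String))) :
    PySem.Dict (String × String) (List String) :=
  d.modify (bKey p.2) [] (fun xs => xs ++ [p.1])

-- A's nested by_cat cell equals the flat ghost cell (invariant of the two folds).
lemma fold_cell_eq (l : List (String × List (String × List (String × String)))) :
    ∀ (dA : PySem.Dict String (PySem.Dict String (List String)))
      (dB : PySem.Dict (String × String) (List String)),
      (∀ c lb, (dA.getD c PySem.Dict.empty).getD lb [] = dB.getD (c, lb) []) →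
      ∀ c lb, (((l.foldl aStep dA).getD c PySem.Dict.empty).getD lb []) =
        ((l.foldl gStep dB).getD (c, lb) []) := by
  induction l with
  | nil => intro dA dB h c lb; exact h c lb
  | cons p rest ih =>
    intro dA dB h c lb
    simp only [List.foldl_cons]
    apply ih
    intro c' lb'
    simp only [aStep, gStep, bKey, aAnyR]
    rw [PySem.Dict.getD_modify, PySem.Dict.getD_modify]
    set ct := (PySem.Dict.mk ((p.2.map Prod.snd).headD [])).getD "change_type" "" with hct
    set lB := (PySem.Dict.mk ((p.2.map Prod.snd).headD [])).getD "label" "" with hlb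
    by_cases hc : c' = ct
    · subst hc
      rw [if_pos rfl, PySem.Dict.getD_modify]
      by_cases hl : lb' = lB
      · subst hl
        rw [if_pos rfl, if_pos rfl, h]
      · rw [if_neg hl, if_neg (by simp [hl]), h]
    · rw [if_neg hc, if_neg (by simp [hc]), h]

-- A's mixedness condition as a Bool on filenames.
def aMix (data : List (String × List String)) (lookup : List (String × List (String × List (String × String)))) (fn : String) : Bool :=
  decide (0 < aNCorrect data lookup fn ∧ aNCorrect data lookup fn < (aPreds data lookup fn).length)

-- B's per-row mixed test on lookup[fn] equals A's zip-count condition.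
lemma mixed_eq (data : List (String × List String)) (lookup : List (String × List (String × List (String × String)))) (fn : String) :
    bMixed ((PySem.Dict.mk data).getD "models" []) (aRow lookup fn) = aMix data lookup fn := by
  unfold bMixed aMix aNCorrect aPreds aGts
  simp only [List.zip_map', List.countP_map, List.length_map, Function.comp_def]

-- A's best/break scan is find?-with-default.
lemma pick_loop_eq (data : List (String × List String)) (lookup : List (String × List (String × List (String × String)))) (cs : List String) (best : String) :
    aPickLoop data lookup cs best = (cs.find? (aMix data lookup)).getD best := by
  induction cs with
  | nil => rfl
  | cons fn rest ih =>
    rw [aPickLoop, List.find?_cons]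
    by_cases h : 0 < aNCorrect data lookup fn ∧ aNCorrect data lookup fn < (aPreds data lookup fn).length
    · rw [if_pos h]; simp [aMix, h]
    · rw [if_neg h]
      have : aMix data lookup fn = false := by simp [aMix, h]
      rw [this, ih]

-- Invariant of B's streaming fold against the ghost grouping fold: per key, first = head?, fm = find? m.
lemma stream_inv (ms : List String) (m : String → Bool)
    (l : List (String × List (String × List (String × String))))
    (hl : ∀ p ∈ l, bMixed ms p.2 = m p.1) :
    ∀ (st : PySem.Dict (String × String) String × PySem.Dict (String × String) String)
      (g : PySem.Dict (String × String) (List String)),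
      (∀ k, st.1.get? k = (g.getD k []).head? ∧ st.2.get? k = (g.getD k []).find? m) →
      ∀ k, ((l.foldl (bStep ms) st).1.get? k = ((l.foldl gStep g).getD k []).head? ∧
            (l.foldl (bStep ms) st).2.get? k = ((l.foldl gStep g).getD k []).find? m) := by
  induction l with
  | nil => intro st g h k; exact h k
  | cons p rest ih =>
    intro st g h k
    simp only [List.foldl_cons]
    apply ih (fun q hq => hl q (List.mem_cons_of_mem _ hq))
    intro k'
    simp only [bStep, gStep]
    rw [PySem.Dict.getD_modify]
    by_cases hk : k' = bKey p.2
    · subst hk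
      rw [if_pos rfl]
      obtain ⟨h1, h2⟩ := h (bKey p.2)
      constructor
      · by_cases hc : st.1.contains (bKey p.2)
        · rw [if_pos hc]
          have hs : (st.1.get? (bKey p.2)).isSome := by
            rw [← PySem.Dict.contains_eq_isSome_get?]; exact hc
          rw [h1] at hs
          cases hcell : (g.getD (bKey p.2) []).head? with
          | none => rw [hcell] at hs; simp at hs
          | some v =>
            rw [h1, hcell]
            cases hg : g.getD (bKey p.2) [] with
            | nil => rw [hg] at hcell; simp at hcell
            | cons a t => rw [hg] at hcell; simp at hcell ⊢; exact hcell.symm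
        · rw [if_neg hc]
          have hn : st.1.get? (bKey p.2) = none := by
            rw [PySem.Dict.get?_eq_none_iff_contains]
            exact Bool.not_eq_true _ ▸ (by simpa using hc)
          rw [h1] at hn
          have hg : g.getD (bKey p.2) [] = [] := by
            cases hg : g.getD (bKey p.2) [] with
            | nil => rfl
            | cons a t => rw [hg] at hn; simp at hn
          rw [PySem.Dict.get?_insert_self, hg]
          simp
      · by_cases hc : st.2.contains (bKey p.2)
        · rw [if_pos hc]
          have hs : (st.2.get? (bKey p.2)).isSome := by
            rw [← PySem.Dict.contains_eq_isSome_get?]; exact hc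
          rw [h2] at hs
          cases hcell : (g.getD (bKey p.2) []).find? m with
          | none => rw [hcell] at hs; simp at hs
          | some v =>
            rw [h2, hcell, List.find?_append, hcell]
            rfl
        · rw [if_neg hc]
          have hn : st.2.get? (bKey p.2) = none := by
            rw [PySem.Dict.get?_eq_none_iff_contains]
            exact Bool.not_eq_true _ ▸ (by simpa using hc)
          rw [h2] at hn
          have hm : bMixed ms p.2 = m p.1 := hl p (List.mem_cons_self ..)
          rw [List.find?_append, hn, hm]
          cases hmp : m p.1 with
          | true =>
            rw [if_pos rfl, PySem.Dict.get?_insert_self]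
            simp [List.find?, hmp]
          | false =>
            rw [if_neg (by simp)]
            simp [List.find?, hmp, h2, hn]
    · rw [if_neg hk]
      obtain ⟨h1, h2⟩ := h k'
      constructor
      · by_cases hc : st.1.contains (bKey p.2)
        · rw [if_pos hc]; exact h1
        · rw [if_neg hc, PySem.Dict.get?_insert, if_neg hk]; exact h1
      · by_cases hc : st.2.contains (bKey p.2)
        · rw [if_pos hc]; exact h2
        · rw [if_neg hc]
          cases hmp : bMixed ms p.2 with
          | true => rw [if_pos rfl, PySem.Dict.get?_insert, if_neg hk]; exact h2
          | false => rw [if_neg (by simp)]; exact h2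

-- On a duplicate-free lookup, B's per-pair mixed test agrees with A's per-filename one.
lemma mixed_mem (data : List (String × List String)) (lookup : List (String × List (String × List (String × String))))
    (hnd : (lookup.map Prod.fst).Nodup)
    (p : String × List (String × List (String × String))) (hp : p ∈ lookup) :
    bMixed ((PySem.Dict.mk data).getD "models" []) p.2 = aMix data lookup p.1 := by
  have hrow : aRow lookup p.1 = p.2 := by
    unfold aRow
    exact PySem.Dict.getD_of_mem_items (d := PySem.Dict.mk lookup) hp hnd []
  rw [← mixed_eq data lookup p.1, hrow]

-- ===== VERDICT (by name: the statement is the Claim_ definition above) =====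
theorem pick_examples_spec : Claim_equal_pick_examples := by
  intro data lookup _ hpre
  obtain ⟨hnd, -, -⟩ := hpre
  unfold Spec_pick_examples pick_examples pick_examples_alt
  have hinv := stream_inv ((PySem.Dict.mk data).getD "models" []) (aMix data lookup) lookup
    (fun p hp => mixed_mem data lookup hnd p hp)
    (PySem.Dict.empty, PySem.Dict.empty) PySem.Dict.empty
    (fun k => by simp [PySem.Dict.get?_empty, PySem.Dict.getD_empty])
  refine List.map_congr_left (fun ct _ => ?_)
  refine congrArg (Prod.mk ct) (congrArg (fun f => List.foldl f [] ["clean", "messy"]) ?_)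
  funext ex label
  obtain ⟨h1, h2⟩ := hinv (ct, label)
  have hcell : ((aByCat lookup).getD ct PySem.Dict.empty).getD label [] =
      (lookup.foldl gStep PySem.Dict.empty).getD (ct, label) [] := by
    unfold aByCat
    exact fold_cell_eq lookup PySem.Dict.empty PySem.Dict.empty
      (fun c lb => by simp [PySem.Dict.getD_empty]) ct label
  rw [hcell, h1, h2]
  cases hg : (lookup.foldl gStep PySem.Dict.empty).getD (ct, label) [] with
  | nil => rfl
  | cons c rest =>
    simp only [List.head?]
    rw [pick_loop_eq]
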